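-- pv_equiv track=rewrite | github.com/AndreiCarabelea/infoManagement | test.py | removeEmptyTopics
-- ===== SOURCE A (Python) =====
-- def removeEmptyTopics(content):
-- 	while True:
-- 		n = len(content)
-- 		if n >= 2:
-- 			removed = False
-- 			for i in range(n - 1):
-- 				# the same identation level
--
-- 				if content[i].rfind("\t") >= content[i + 1].rfind("\t") and len(content[i]) > 4 and len(
-- 						content[i + 1]) > 4:
-- 					if (":" in content[i]) and (":" in content[i + 1]):
-- 						# after removal index i+1 becomes i
-- 						content.remove(content[i])
-- 						removed = True
-- 						break
-- 			if not removed: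
-- 				break
-- 		else:
-- 			break
-- 	if len(content) == 1:
-- 		content = []
-- 	return content
-- ===== SOURCE B (Python) =====
-- def removeEmptyTopics(content):
--     # One left-to-right pass with a stack instead of repeated full rescans.
--     # (A mutates its argument in place; B does not — equivalence is about the
--     # return value only.)
--     stack = []
--     for cur in content:
--         while (stack
--                and stack[-1].rfind("\t") >= cur.rfind("\t")
--                and len(stack[-1]) > 4 and len(cur) > 4
--                and ":" in stack[-1] and ":" in cur):
--             stack.pop()
--         stack.append(cur)
--     return [] if len(stack) == 1 else stack
-- ===== Notes on version B (the rewrite author's own statement) =====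
-- stated objective: alternative
-- what changed: Replaces A's restart-from-scratch loop (rescan all adjacent pairs, list.remove by value, repeat until no change) by a single left-to-right pass with a stack that pops the top line while it forms a removable pair with the incoming line; worst-case asymptotics improve but a timing run did not confirm a speed-up on the generated inputs.
import Mathlib
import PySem

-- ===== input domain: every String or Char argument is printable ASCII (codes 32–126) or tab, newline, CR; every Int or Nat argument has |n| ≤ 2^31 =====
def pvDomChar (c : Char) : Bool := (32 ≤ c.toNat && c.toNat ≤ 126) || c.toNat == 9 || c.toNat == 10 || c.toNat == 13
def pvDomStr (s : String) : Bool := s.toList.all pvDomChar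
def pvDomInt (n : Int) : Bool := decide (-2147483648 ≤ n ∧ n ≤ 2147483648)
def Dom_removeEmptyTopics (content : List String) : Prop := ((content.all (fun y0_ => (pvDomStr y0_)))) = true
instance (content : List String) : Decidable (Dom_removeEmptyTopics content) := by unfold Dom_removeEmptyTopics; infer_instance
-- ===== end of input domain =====

-- B replaces A's restart-rescan-and-remove-by-value loop by a single left-to-right stack
-- pass (alternative algorithm); A mutates its argument in place, B does not — the
-- equivalence proved here is about the return value only.


-- ===== PORT A =====
-- A's inner `for i in range(n-1): … break`: scan adjacent pairs, return the first
-- content[i] whose pair satisfies the (nested, as in A) condition.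
def findPairA : List String → Option String
  | x :: y :: rest =>
    if PySem.Str.rfind x "\t" ≥ PySem.Str.rfind y "\t" ∧ PySem.Str.len x > 4 ∧ PySem.Str.len y > 4 then
      if PySem.Str.isIn ":" x ∧ PySem.Str.isIn ":" y then some x
      else findPairA (y :: rest)
    else findPairA (y :: rest)
  | _ => none

-- needed by loopA's termination proof
theorem findPairA_mem : ∀ (l : List String) (x : String), findPairA l = some x → x ∈ l
  | a :: b :: rest, x, h => by
    simp only [findPairA] at h
    split_ifs at h with h1 h2
    · cases h; exact List.mem_cons_self
    · exact List.mem_cons_of_mem _ (findPairA_mem (b :: rest) x h)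
    · exact List.mem_cons_of_mem _ (findPairA_mem (b :: rest) x h)

-- A's `while True:` loop: rescan from scratch; `content.remove(content[i])` is Python's
-- remove-by-value (first occurrence), ported with PySem.List.remove?.
def loopA (content : List String) : List String :=
  if 2 ≤ content.length then
    match hf : findPairA content with
    | some x =>
      match hr : PySem.List.remove? content x with
      | some c2 => loopA c2
      | none => content   -- unreachable: findPairA always returns an element of content
    | none => content
  else content
termination_by content.length
decreasing_by
  have hx : x ∈ content := findPairA_mem content x hf
  rw [PySem.List.remove?_eq_some_erase content x hx] at hr
  injection hr with hr
  subst hr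
  have h1 := List.length_erase_of_mem hx
  have h2 : 0 < content.length := List.length_pos_of_mem hx
  omega

def removeEmptyTopics (content : List String) : List String :=
  let c2 := loopA content
  if c2.length = 1 then [] else c2

-- ===== PORT B =====
-- Source B's inner `while stack and …: stack.pop()` (stack held head-first: head = top).
def popAll (stack : List String) (cur : String) : List String :=
  match stack with
  | [] => []
  | t :: rest =>
    if PySem.Str.rfind t "\t" ≥ PySem.Str.rfind cur "\t" ∧ PySem.Str.len t > 4 ∧ PySem.Str.len cur > 4 ∧ PySem.Str.isIn ":" t ∧ PySem.Str.isIn ":" cur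
    then popAll rest cur
    else t :: rest

-- Source B's `for cur in content:` pass; the final .reverse restores append-at-end order.
def runB : List String → List String → List String
  | stack, [] => stack.reverse
  | stack, cur :: rest => runB (cur :: popAll stack cur) rest

def removeEmptyTopics_alt (content : List String) : List String :=
  let stack := runB [] content
  if stack.length = 1 then [] else stack

-- ===== PRECONDITION & SPEC =====
-- a removable line: longer than 4 chars and containing ':' (only such lines are ever removed)
def pvElig (s : String) : Bool := decide (PySem.Str.len s > 4) && PySem.Str.isIn ":" s

-- Pre_ excludes lists in which some removable line (length > 4, containing ':') occurs twice:
-- there A's `content.remove(content[i])` deletes the first equal occurrence rather than the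
-- scanned position i, an accidental first-vs-scanned-match choice.
def Pre_removeEmptyTopics (content : List String) : Prop :=
  (content.filter pvElig).Nodup
instance (content : List String) : Decidable (Pre_removeEmptyTopics content) := by unfold Pre_removeEmptyTopics; infer_instance

def pvWitness_removeEmptyTopics : List String := ["a:bcd", "ab", "b:cde"]

def Spec_removeEmptyTopics (content : List String) (out : List String) : Prop := out = removeEmptyTopics_alt content
instance (content : List String) (out : List String) : Decidable (Spec_removeEmptyTopics content out) := by unfold Spec_removeEmptyTopics; infer_instance

-- ===== CLAIM (what is proved, stated in full; the proofs are below) =====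
def Claim_equal_removeEmptyTopics : Prop := ∀ (content : List String), Dom_removeEmptyTopics content → Pre_removeEmptyTopics content → Spec_removeEmptyTopics content (removeEmptyTopics content)

-- ===== LEMMAS AND PROOFS =====

-- the removal condition, as one proposition
def pvCond (x y : String) : Prop :=
  (PySem.Str.rfind x "\t" ≥ PySem.Str.rfind y "\t" ∧ PySem.Str.len x > 4 ∧ PySem.Str.len y > 4) ∧
    (PySem.Str.isIn ":" x ∧ PySem.Str.isIn ":" y)

theorem pvCond_elig {x y : String} (h : pvCond x y) : pvElig x = true ∧ pvElig y = true := by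
  obtain ⟨⟨_, hx, hy⟩, hix, hiy⟩ := h
  simp only [pvElig, Bool.and_eq_true, decide_eq_true_eq]
  exact ⟨⟨hx, hix⟩, hy, hiy⟩

theorem findPairA_cons_pos {x y : String} (r : List String) (h : pvCond x y) :
    findPairA (x :: y :: r) = some x := by
  simp only [findPairA]
  rw [if_pos h.1, if_pos h.2]

theorem findPairA_cons_neg {x y : String} (r : List String) (h : ¬ pvCond x y) :
    findPairA (x :: y :: r) = findPairA (y :: r) := by
  simp only [findPairA]
  split_ifs with h1 h2
  · exact absurd ⟨h1, h2⟩ h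
  · rfl
  · rfl

theorem popAll_cons_pos {t cur : String} (s : List String) (h : pvCond t cur) :
    popAll (t :: s) cur = popAll s cur := by
  simp only [popAll]
  rw [if_pos (by obtain ⟨⟨a, b, c⟩, d, e⟩ := h; exact ⟨a, b, c, d, e⟩)]

theorem popAll_cons_neg {t cur : String} (s : List String) (h : ¬ pvCond t cur) :
    popAll (t :: s) cur = t :: s := by
  simp only [popAll]
  rw [if_neg (by rintro ⟨a, b, c, d, e⟩; exact h ⟨⟨a, b, c⟩, d, e⟩)]

-- a stack (head = top) none of whose adjacent entries form a removable pair
def pvGood (s : List String) : Prop := List.IsChain (fun a b => ¬ pvCond b a) s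

theorem findPairA_none : ∀ (l : List String), List.IsChain (fun a b => ¬ pvCond a b) l → findPairA l = none
  | [], _ => rfl
  | [_], _ => rfl
  | x :: y :: r, h => by
    rw [findPairA_cons_neg r (List.isChain_cons_cons.mp h).1]
    exact findPairA_none (y :: r) (List.isChain_cons_cons.mp h).2

theorem findPairA_skip : ∀ (l : List String) (t : String) (rs : List String),
    List.IsChain (fun a b => ¬ pvCond a b) (l ++ [t]) →
    findPairA (l ++ t :: rs) = findPairA (t :: rs)
  | [], _, _, _ => rfl
  | [x], t, rs, h => findPairA_cons_neg rs (List.isChain_cons_cons.mp h).1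
  | x :: y :: l', t, rs, h => by
    have h' := List.isChain_cons_cons.mp h
    rw [List.cons_append, List.cons_append, findPairA_cons_neg _ h'.1]
    exact findPairA_skip (y :: l') t rs h'.2

theorem findPairA_some_len {l : List String} {x : String} (h : findPairA l = some x) :
    2 ≤ l.length := by
  match l with
  | [] => simp [findPairA] at h
  | [_] => simp [findPairA] at h
  | _ :: _ :: _ => simp

theorem loopA_of_none {l : List String} (h : findPairA l = none) : loopA l = l := by
  rw [loopA]
  split
  · split
    · rename_i heq; rw [h] at heq; cases heq
    · rfl
  · rfl

theorem loopA_step {l : List String} {x : String} (hf : findPairA l = some x) :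
    loopA l = loopA (l.erase x) := by
  have hx : x ∈ l := findPairA_mem l x hf
  rw [loopA, if_pos (findPairA_some_len hf)]
  split
  · rename_i x' heq
    rw [hf] at heq; injection heq with heq; subst heq
    split
    · rename_i c2 heq2
      rw [PySem.List.remove?_eq_some_erase l x hx] at heq2
      injection heq2 with heq2; rw [heq2]
    · rename_i heq2
      rw [PySem.List.remove?_eq_some_erase l x hx] at heq2; cases heq2
  · rename_i heq; rw [hf] at heq; cases heq

theorem popAll_good {cur : String} : ∀ {s : List String}, pvGood s → pvGood (popAll s cur)
  | [], h => h
  | t :: s', h => by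
    by_cases hc : pvCond t cur
    · rw [popAll_cons_pos s' hc]
      exact popAll_good (h.tail)
    · rw [popAll_cons_neg s' hc]; exact h

theorem popAll_head {cur : String} : ∀ (s : List String),
    popAll s cur = [] ∨ ∃ t r, popAll s cur = t :: r ∧ ¬ pvCond t cur
  | [] => Or.inl rfl
  | t :: s' => by
    by_cases hc : pvCond t cur
    · rw [popAll_cons_pos s' hc]; exact popAll_head s'
    · rw [popAll_cons_neg s' hc]; exact Or.inr ⟨t, s', rfl, hc⟩

theorem popAll_sublist {cur : String} : ∀ (s : List String), (popAll s cur).Sublist s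
  | [] => List.Sublist.refl _
  | t :: s' => by
    by_cases hc : pvCond t cur
    · rw [popAll_cons_pos s' hc]
      exact (popAll_sublist s').trans (List.sublist_cons_self t s')
    · rw [popAll_cons_neg s' hc]

theorem pvGood_push {cur : String} {s : List String} (hg : pvGood s) :
    pvGood (cur :: popAll s cur) := by
  refine (popAll_good hg).cons ?_
  rcases popAll_head (cur := cur) s with h0 | ⟨t, r, heq, hc⟩
  · rw [h0]; intro y hy; cases hy
  · rw [heq]; intro y hy; cases hy; exact hc

-- pop phase: removing A's leftmost removable pairs one by one is exactly Source B's pop loop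
theorem pop_phase : ∀ (s : List String) (cur : String) (rest : List String),
    pvGood s → ((s.reverse ++ cur :: rest).filter pvElig).Nodup →
    loopA (s.reverse ++ cur :: rest) = loopA ((popAll s cur).reverse ++ cur :: rest)
  | [], cur, rest, _, _ => rfl
  | t :: s', cur, rest, hg, hnd => by
    by_cases hc : pvCond t cur
    · rw [popAll_cons_pos s' hc]
      have hassoc : (t :: s').reverse ++ cur :: rest = s'.reverse ++ t :: (cur :: rest) := by
        simp
      have hchain : List.IsChain (fun a b => ¬ pvCond a b) (s'.reverse ++ [t]) := by
        have : List.IsChain (fun a b => ¬ pvCond a b) ((t :: s').reverse) :=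
          List.isChain_reverse.mpr hg
        simpa using this
      have hfind : findPairA (s'.reverse ++ t :: (cur :: rest)) = some t := by
        rw [findPairA_skip s'.reverse t _ hchain]
        exact findPairA_cons_pos _ hc
      have htnotin : t ∉ s'.reverse := by
        intro hmem
        rw [hassoc] at hnd
        rw [List.filter_append] at hnd
        have ht : pvElig t = true := (pvCond_elig hc).1
        have h1 : t ∈ s'.reverse.filter pvElig := List.mem_filter.mpr ⟨hmem, ht⟩
        have h2 : t ∈ (t :: (cur :: rest)).filter pvElig := by
          rw [List.filter_cons_of_pos ht]; exact List.mem_cons_self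
        exact (List.nodup_append.mp hnd).2.2 t h1 t h2 rfl
      have herase : (s'.reverse ++ t :: (cur :: rest)).erase t = s'.reverse ++ cur :: rest := by
        rw [List.erase_append, if_neg htnotin, List.erase_cons_head]
      rw [hassoc, loopA_step hfind, herase]
      refine pop_phase s' cur rest hg.tail ?_
      have hsub : (s'.reverse ++ cur :: rest).Sublist (s'.reverse ++ t :: (cur :: rest)) :=
        List.Sublist.append (List.Sublist.refl _) (List.sublist_cons_self t _)
      rw [hassoc] at hnd
      exact hnd.sublist (hsub.filter pvElig)
    · rw [popAll_cons_neg s' hc]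

-- main invariant: A's whole while-loop equals Source B's stack pass
theorem pv_main : ∀ (rest s : List String), pvGood s →
    ((s.reverse ++ rest).filter pvElig).Nodup →
    loopA (s.reverse ++ rest) = runB s rest
  | [], s, hg, _ => by
    rw [List.append_nil, runB]
    exact loopA_of_none (findPairA_none _ (List.isChain_reverse.mpr hg))
  | cur :: rest', s, hg, hnd => by
    rw [pop_phase s cur rest' hg hnd]
    have hassoc : (popAll s cur).reverse ++ cur :: rest' = (cur :: popAll s cur).reverse ++ rest' := by
      simp
    rw [hassoc]
    rw [pv_main rest' (cur :: popAll s cur) (pvGood_push hg) ?_]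
    · conv_rhs => rw [runB]
    · rw [← hassoc]
      have hsub : ((popAll s cur).reverse ++ cur :: rest').Sublist (s.reverse ++ cur :: rest') :=
        List.Sublist.append (popAll_sublist s).reverse (List.Sublist.refl _)
      exact hnd.sublist (hsub.filter pvElig)

-- ===== VERDICT (by name: the statement is the Claim_ definition above) =====
theorem removeEmptyTopics_spec : Claim_equal_removeEmptyTopics := by
  intro content _hdom hpre
  unfold Spec_removeEmptyTopics removeEmptyTopics removeEmptyTopics_alt
  have h : loopA content = runB [] content := by
    have := pv_main content [] (by constructor) (by simpa using hpre)
    simpa using this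
  rw [h]
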